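-- pv_equiv track=rewrite | github.com/ASamuraiS619/Project_Euler | project_euler_62.py | digits_tuple
-- ===== SOURCE A (Python) =====
-- def digits_tuple(num):
--     digits = {}
--     str_num = str(num)
--     for digit_number in str_num:
--         try:
--             digits[digit_number] += 1
--         except KeyError:
--             digits[digit_number] = 1
--     # タプルでないと辞書のキーに出来ないのでタプル化して返す。
--     return tuple(sorted(digits.items()))
-- ===== SOURCE B (Python) =====
-- def digits_tuple(num):
--     # sort the characters, then run-length-encode maximal runs of equal characters
--     def rle(chars):
--         if not chars:
--             return []
--         ch = chars[0]
--         i = 1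
--         while i < len(chars) and chars[i] == ch:
--             i += 1
--         return [(ch, i)] + rle(chars[i:])
--     return tuple(rle(sorted(str(num))))
-- ===== Notes on version B (the rewrite author's own statement) =====
-- stated objective: alternative
-- what changed: Replaces the try/except dict accumulation followed by sorting the items with a sort-then-group algorithm: sort the characters of str(num) and recursively run-length-encode the maximal runs of equal characters, so no dictionary or item sort is needed.
import Mathlib
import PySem

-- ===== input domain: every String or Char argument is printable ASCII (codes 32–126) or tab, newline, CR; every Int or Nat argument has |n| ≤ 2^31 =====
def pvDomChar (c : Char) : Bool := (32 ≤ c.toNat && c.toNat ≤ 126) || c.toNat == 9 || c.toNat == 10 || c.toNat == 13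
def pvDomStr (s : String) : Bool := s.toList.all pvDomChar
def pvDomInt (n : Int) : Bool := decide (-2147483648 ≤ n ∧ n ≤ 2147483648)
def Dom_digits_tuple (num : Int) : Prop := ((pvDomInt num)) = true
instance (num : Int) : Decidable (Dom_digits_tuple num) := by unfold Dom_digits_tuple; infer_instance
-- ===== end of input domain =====

-- B replaces A's try/except dict accumulation + item sort by sorting the characters and
-- run-length-encoding the maximal runs of equal characters (objective: alternative algorithm).


-- iterating a Python string yields length-1 strings
def pvToStr1 (c : Char) : String := String.ofList [c]

-- ===== PORT A =====
def digits_tuple (num : Int) : List (String × Int) :=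
  let str_num := (PySem.Int.toChars num).map pvToStr1
  let digits := str_num.foldl (fun d ch =>
    match d.get? ch with          -- try: digits[ch] += 1
    | some v => d.insert ch (v + 1)
    | none   => d.insert ch 1) PySem.Dict.empty   -- except KeyError: digits[ch] = 1
  PySem.List.sorted2 digits.items Prod.fst Prod.snd

-- ===== PORT B =====
-- helper rle(chars): first char, count the run of equal following chars, recurse on the rest
def pvRle : List String → List (String × Int)
  | [] => []
  | ch :: t =>
      (ch, 1 + ((t.takeWhile (fun c => c == ch)).length : Int)) ::
        pvRle (t.dropWhile (fun c => c == ch))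
termination_by l => l.length
decreasing_by
  simp only [List.length_cons]
  exact Nat.lt_succ_of_le (List.length_dropWhile_le _ _)

def digits_tuple_alt (num : Int) : List (String × Int) :=
  pvRle (PySem.List.sorted ((PySem.Int.toChars num).map pvToStr1) (fun x => x) false)

-- ===== PRECONDITION & SPEC =====
def Spec_digits_tuple (num : Int) (out : List (String × Int)) : Prop := out = digits_tuple_alt num
instance (num : Int) (out : List (String × Int)) : Decidable (Spec_digits_tuple num out) := by unfold Spec_digits_tuple; infer_instance

-- ===== CLAIM (what is proved, stated in full; the proofs are below) =====
def Claim_equal_digits_tuple : Prop := ∀ (num : Int), Dom_digits_tuple num → Spec_digits_tuple num (digits_tuple num)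

-- ===== LEMMAS AND PROOFS =====

-- the two comparison predicates agree on distinct keys
theorem pvInsertBy_map {g : String → Int} (x : String) (acc : List String)
    (hx : x ∉ acc) :
    PySem.List.insertBy
      (fun a b : String × Int =>
        decide (a.1 < b.1) || (!decide (b.1 < a.1) && decide (a.2 < b.2)))
      (x, g x) (acc.map (fun k => (k, g k)))
    = (PySem.List.insertBy (fun a b => decide (a < b)) x acc).map (fun k => (k, g k)) := by
  induction acc with
  | nil => simp [PySem.List.insertBy]
  | cons y t ih =>
    have hxy : x ≠ y := by simp at hx; exact hx.1
    have hlt : (decide (x < y) || (!decide (y < x) && decide (g x < g y))) = decide (x < y) := by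
      rcases lt_or_gt_of_ne hxy with h | h
      · simp [h, not_lt_of_gt h]
      · simp [h, not_lt_of_gt h]
    simp only [List.map_cons, PySem.List.insertBy, hlt]
    by_cases h : x < y
    · simp [h]
    · simp only [h, decide_false, Bool.false_eq_true, if_false, List.map_cons]
      rw [ih (by simp at hx; exact hx.2)]

theorem pvFold_map {g : String → Int} (L acc : List String)
    (hL : L.Nodup) (h : ∀ z ∈ L, z ∉ acc) :
    (L.map (fun k => (k, g k))).foldl
      (fun a x => PySem.List.insertBy
        (fun a b : String × Int =>
          decide (a.1 < b.1) || (!decide (b.1 < a.1) && decide (a.2 < b.2))) x a)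
      (acc.map (fun k => (k, g k)))
    = (L.foldl (fun a x => PySem.List.insertBy (fun a b => decide (a < b)) x a) acc).map
        (fun k => (k, g k)) := by
  induction L generalizing acc with
  | nil => simp
  | cons x t ih =>
    simp only [List.map_cons, List.foldl_cons]
    rw [pvInsertBy_map x acc (h x (by simp))]
    refine ih _ (List.nodup_cons.mp hL).2 ?_
    intro z hz hmem
    rw [PySem.List.mem_insertBy] at hmem
    rcases hmem with rfl | hmem
    · exact (List.nodup_cons.mp hL).1 hz
    · exact h z (by simp [hz]) hmem

-- sorting distinct-key pairs by the tuple = sorting the keys and re-attaching values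
theorem pvSorted2_map {g : String → Int} (S : List String) (hS : S.Nodup) :
    PySem.List.sorted2 (S.map (fun k => (k, g k))) Prod.fst Prod.snd
    = (PySem.List.sorted S (fun x => x) false).map (fun k => (k, g k)) := by
  rw [PySem.List.sorted_eq_foldl_insertBy]
  have := pvFold_map (g := g) S [] hS (by simp)
  simpa [PySem.List.sorted2] using this

-- on a ≤-sorted list, every element after a run of ch is strictly greater than ch
theorem pvRest_gt (ch : String) (t : List String)
    (hle : ∀ y ∈ t, ch ≤ y) (ht : t.Pairwise (· ≤ ·)) :
    ∀ x ∈ t.dropWhile (fun c => c == ch), ch < x := by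
  cases hrest : t.dropWhile (fun c => c == ch) with
  | nil => simp
  | cons y t' =>
    have hyne : y ≠ ch := by
      have := List.head?_dropWhile_not (fun c => c == ch) t
      rw [hrest] at this
      simpa using this
    have hymem : y ∈ t := (List.dropWhile_sublist _).subset (by rw [hrest]; simp)
    have hchy : ch < y := lt_of_le_of_ne (hle y hymem) (Ne.symm hyne)
    have hpw : (y :: t').Pairwise (· ≤ ·) := by
      rw [← hrest]; exact List.Pairwise.sublist (List.dropWhile_sublist _) ht
    intro x hx
    rcases List.mem_cons.mp hx with rfl | hx
    · exact hchy
    · exact lt_of_lt_of_le hchy ((List.pairwise_cons.mp hpw).1 x hx)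

-- characterisation of pvRle on a ≤-sorted list: its keys are strictly increasing, are exactly
-- the members of the list, and each key carries its multiplicity
theorem pvRle_spec (m : List String) (hm : m.Pairwise (· ≤ ·)) :
    pvRle m = ((pvRle m).map Prod.fst).map (fun k => (k, (m.count k : Int)))
    ∧ ((pvRle m).map Prod.fst).Pairwise (· < ·)
    ∧ ∀ x, x ∈ (pvRle m).map Prod.fst ↔ x ∈ m := by
  induction m using pvRle.induct with
  | case1 => simp [pvRle]
  | case2 ch t ih =>
    have hle : ∀ y ∈ t, ch ≤ y := (List.pairwise_cons.mp hm).1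
    have ht : t.Pairwise (· ≤ ·) := (List.pairwise_cons.mp hm).2
    have hrest : t.dropWhile (fun c => c == ch) |>.Pairwise (· ≤ ·) :=
      List.Pairwise.sublist (List.dropWhile_sublist _) ht
    obtain ⟨ihEq, ihPw, ihMem⟩ := ih hrest
    set run := t.takeWhile (fun c => c == ch) with hrun
    set rest := t.dropWhile (fun c => c == ch) with hrestdef
    have hsplit : t = run ++ rest := (List.takeWhile_append_dropWhile).symm
    have hrunch : ∀ x ∈ run, x = ch := by
      intro x hx
      simpa using List.mem_takeWhile_imp hx
    have hgt : ∀ x ∈ rest, ch < x := pvRest_gt ch t hle ht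
    have hrestmem : ∀ x, x ∈ (pvRle rest).map Prod.fst ↔ x ∈ rest := ihMem
    -- count of ch in ch :: t
    have hcount_ch : (ch :: t).count ch = 1 + run.length := by
      have h0 : rest.count ch = 0 := by
        rw [List.count_eq_zero]
        intro hmem
        exact absurd rfl (ne_of_gt (hgt ch hmem))
      have h1 : run.count ch = run.length := by
        rw [List.count_eq_length]
        intro b hb
        exact (hrunch b hb).symm
      rw [hsplit]
      simp [List.count_append, h0, h1]
      omega
    -- counts of keys of rest agree between rest and ch :: t
    have hcount_rest : ∀ k ∈ (pvRle rest).map Prod.fst,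
        (ch :: t).count k = rest.count k := by
      intro k hk
      have hkrest : k ∈ rest := (hrestmem k).mp hk
      have hkne : k ≠ ch := ne_of_gt (hgt k hkrest)
      have hkrun : run.count k = 0 := by
        rw [List.count_eq_zero]
        intro hmem
        exact hkne (hrunch k hmem)
      have hne' : ¬ (ch = k) := fun h => hkne h.symm
      rw [hsplit]
      simp [List.count_append, hkrun, hne']
    refine ⟨?_, ?_, ?_⟩
    · -- the value equation
      rw [pvRle]
      simp only [List.map_cons]
      have hch : ((ch :: t).count ch : Int) = 1 + ((t.takeWhile (fun c => c == ch)).length : Int) := by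
        rw [hcount_ch]; push_cast; ring
      rw [hch]
      congr 1
      conv_lhs => rw [ihEq]
      rw [List.map_map, List.map_map]
      apply List.map_congr_left
      intro k hk
      simp only [Function.comp]
      rw [hcount_rest k.1 (List.mem_map_of_mem hk)]
    · -- strictly increasing keys
      rw [pvRle]
      simp only [List.map_cons, List.pairwise_cons]
      refine ⟨?_, ihPw⟩
      intro k hk
      exact hgt k ((hrestmem k).mp hk)
    · -- membership
      intro x
      rw [pvRle]
      simp only [List.map_cons, List.mem_cons]
      constructor
      · rintro (rfl | hx)
        · exact Or.inl rfl
        · exact Or.inr ((List.dropWhile_sublist _).subset ((hrestmem x).mp hx))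
      · rintro (rfl | hx)
        · exact Or.inl rfl
        · rw [hsplit] at hx
          rcases List.mem_append.mp hx with hx | hx
          · exact Or.inl (hrunch x hx)
          · exact Or.inr ((hrestmem x).mpr hx)

-- ===== VERDICT (by name: the statement is the Claim_ definition above) =====
theorem digits_tuple_spec : Claim_equal_digits_tuple := by
  intro num _
  unfold Spec_digits_tuple digits_tuple digits_tuple_alt
  simp only []
  set l := (PySem.Int.toChars num).map pvToStr1 with hl
  set m := PySem.List.sorted l (fun x => x) false with hm
  -- A's loop is the counter
  have hstep : (fun (d : PySem.Dict String Int) ch =>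
      match d.get? ch with
      | some v => d.insert ch (v + 1)
      | none   => d.insert ch 1)
      = (fun d ch => d.insert ch (d.getD ch 0 + 1)) := by
    funext d ch
    cases h : d.get? ch with
    | none => rw [PySem.Dict.getD_eq_get?_getD, h]; rfl
    | some v => rw [PySem.Dict.getD_eq_get?_getD, h]; rfl
  rw [hstep, PySem.Dict.foldl_insert_getD_add_one_eq_counter, PySem.Dict.items_counter]
  rw [pvSorted2_map (PySem.Set.ofList l) (PySem.Set.nodup_ofList l)]
  -- B's rle of the sorted list
  have hpw : m.Pairwise (· ≤ ·) := by
    have := PySem.List.sorted_pairwise (xs := l) (key := fun x => x)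
    simpa using this
  obtain ⟨hEq, hPw, hMem⟩ := pvRle_spec m hpw
  have hperm : m.Perm l := PySem.List.sorted_perm l _ _
  -- the keys of the rle are sorted(set(l))
  have hkeys : PySem.List.sorted (PySem.Set.ofList l) (fun x => x) false
      = (pvRle m).map Prod.fst := by
    apply PySem.List.sorted_eq_of_perm_of_pairwise_lt
    · rw [List.perm_ext_iff_of_nodup (hPw.imp ne_of_lt) (PySem.Set.nodup_ofList l)]
      intro x
      rw [hMem x, PySem.Set.mem_ofList]
      exact ⟨fun h => hperm.subset h, fun h => hperm.symm.subset h⟩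
    · simpa using hPw
  rw [hkeys]
  conv_rhs => rw [hEq]
  apply List.map_congr_left
  intro k _
  rw [hperm.count_eq]
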